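-- pv_equiv track=rewrite | github.com/pgorgolew/ASD-AGH-COURSE | Algorytmy/Dynamiczne/szachownica.py | trasa2
-- ===== SOURCE A (Python) =====
-- def trasa2(F,A,n):
--     i = j = n-1
--     T = [[" " for _ in range(n)] for _ in range(n)]
--     T[i][j] = T[0][0] = "X"
--     while i!=0 and j != 0:
--         if F[i][j] - A[i][j] == F[i-1][j]: #przyszlismy z gory
--             T[i-1][j] = "X"
--             i-=1
--         else: #przyszlismy z lewej
--             T[i][j-1] = "X"
--             j-=1
--
--     while i!=0:
--         T[i-1][j] = "X"
--         i-=1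
--
--     while j != 0:
--         T[i][j-1] = "X"
--         j-=1
--
--     return T
-- ===== SOURCE B (Python) =====
-- def trasa2(F, A, n):
--     # Row-interval reconstruction by recursion on the row index: the path occupies
--     # one contiguous column run per row, so find where it leaves each row (bottom-up)
--     # and emit every row in one shot as three runs (spaces, X's, spaces).
--     def build(i, hi):
--         if i == 0:
--             return [["X"] * (hi + 1) + [" "] * (n - 1 - hi)]
--         j = hi
--         while j > 0 and F[i][j] - A[i][j] != F[i - 1][j]:
--             j -= 1
--         return build(i - 1, j) + [[" "] * j + ["X"] * (hi - j + 1) + [" "] * (n - 1 - hi)]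
--     return build(n - 1, n - 1)
-- ===== Notes on version B (the rewrite author's own statement) =====
-- stated objective: alternative
-- what changed: Instead of marking single cells of a mutable n-by-n table during a backtracking walk (main while-loop plus two boundary clean-up loops), B never builds or mutates a grid: it recurses on the row index, computes the contiguous column interval the path occupies in each row (the path leaves each row exactly once), and emits every output row in one shot as three runs (spaces, X's, spaces).
import Mathlib
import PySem

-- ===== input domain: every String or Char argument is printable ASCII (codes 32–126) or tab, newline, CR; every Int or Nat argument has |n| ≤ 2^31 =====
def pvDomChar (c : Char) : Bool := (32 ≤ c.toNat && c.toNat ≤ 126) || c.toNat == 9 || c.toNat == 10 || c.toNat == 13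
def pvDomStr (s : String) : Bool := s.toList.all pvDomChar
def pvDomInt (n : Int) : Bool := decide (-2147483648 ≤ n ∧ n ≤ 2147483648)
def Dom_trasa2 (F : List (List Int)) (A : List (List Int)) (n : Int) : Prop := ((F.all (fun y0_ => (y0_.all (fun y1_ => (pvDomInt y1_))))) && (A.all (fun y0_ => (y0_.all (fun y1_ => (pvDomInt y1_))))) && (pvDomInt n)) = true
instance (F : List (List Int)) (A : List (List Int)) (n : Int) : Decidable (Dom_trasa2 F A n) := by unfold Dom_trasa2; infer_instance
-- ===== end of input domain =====

-- B replaces A's cell-by-cell marking of a mutable grid (three while-loops) by a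
-- recursion on the row index that computes each row's contiguous X-interval and emits
-- whole rows as three runs (alternative decomposition, same cost). Neither version
-- mutates its arguments.

-- shared primitive accessors: the reads M[i][j] and writes T[i][j] = v, exact (via
-- PySem.List.pyGetD/pySetD) on every access Python performs inside Pre_trasa2
-- (there every index used is in range and nonnegative)
def pvGet2 (M : List (List Int)) (i j : Int) : Int :=
  PySem.List.pyGetD (PySem.List.pyGetD M i []) j 0

def pvSet2 (T : List (List String)) (i j : Int) (v : String) : List (List String) :=
  PySem.List.pySetD T i (PySem.List.pySetD (PySem.List.pyGetD T i []) j v)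

-- ===== PORT A =====
-- while i!=0 and j != 0: …   (fuel 2*n.toNat suffices: the loops make at most 2n-2 steps inside Pre_)
def trasa2MainLoop (F A : List (List Int)) : Nat → Int → Int → List (List String) → Int × Int × List (List String)
  | 0, i, j, T => (i, j, T)
  | fuel + 1, i, j, T =>
    if i ≠ 0 ∧ j ≠ 0 then
      if pvGet2 F i j - pvGet2 A i j = pvGet2 F (i - 1) j then
        trasa2MainLoop F A fuel (i - 1) j (pvSet2 T (i - 1) j "X")
      else
        trasa2MainLoop F A fuel i (j - 1) (pvSet2 T i (j - 1) "X")
    else (i, j, T)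

-- while i!=0: …
def trasa2UpLoop : Nat → Int → Int → List (List String) → Int × Int × List (List String)
  | 0, i, j, T => (i, j, T)
  | fuel + 1, i, j, T =>
    if i ≠ 0 then trasa2UpLoop fuel (i - 1) j (pvSet2 T (i - 1) j "X") else (i, j, T)

-- while j != 0: …
def trasa2LeftLoop : Nat → Int → Int → List (List String) → Int × Int × List (List String)
  | 0, i, j, T => (i, j, T)
  | fuel + 1, i, j, T =>
    if j ≠ 0 then trasa2LeftLoop fuel i (j - 1) (pvSet2 T i (j - 1) "X") else (i, j, T)

def trasa2 (F : List (List Int)) (A : List (List Int)) (n : Int) : List (List String) :=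
  let i := n - 1
  let T0 := (PySem.List.pyRange 0 n 1).map (fun _ => (PySem.List.pyRange 0 n 1).map (fun _ => " "))
  let T1 := pvSet2 (pvSet2 T0 i i "X") 0 0 "X"
  let r1 := trasa2MainLoop F A (2 * n.toNat) i i T1
  let r2 := trasa2UpLoop (2 * n.toNat) r1.1 r1.2.1 r1.2.2
  let r3 := trasa2LeftLoop (2 * n.toNat) r2.1 r2.2.1 r2.2.2
  r3.2.2

-- ===== PORT B =====
-- inner 'while j > 0 and F[i][j] - A[i][j] != F[i-1][j]: j -= 1'
def pvMoveLeft (F A : List (List Int)) (i j : Int) : Int :=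
  if h : 0 < j ∧ pvGet2 F i j - pvGet2 A i j ≠ pvGet2 F (i - 1) j then
    pvMoveLeft F A i (j - 1)
  else j
termination_by j.toNat
decreasing_by omega

-- 'def build(i, hi): …' — recursion on the row index; fuel n.toNat covers every
-- depth Python reaches inside Pre_ (Python exceeds its recursion limit outside)
def trasa2AltBuild (F A : List (List Int)) (n : Int) : Nat → Int → Int → List (List String)
  | 0, _, _ => []
  | fuel + 1, i, hi =>
    if i = 0 then
      [PySem.List.pyRepeat ["X"] (hi + 1) ++ PySem.List.pyRepeat [" "] (n - 1 - hi)]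
    else
      let j := pvMoveLeft F A i hi
      trasa2AltBuild F A n fuel (i - 1) j ++
        [PySem.List.pyRepeat [" "] j ++ PySem.List.pyRepeat ["X"] (hi - j + 1) ++
         PySem.List.pyRepeat [" "] (n - 1 - hi)]

def trasa2_alt (F : List (List Int)) (A : List (List Int)) (n : Int) : List (List String) :=
  trasa2AltBuild F A n n.toNat (n - 1) (n - 1)

-- ===== PRECONDITION & SPEC =====
-- Pre_ excludes n ≤ 0 (A raises IndexError on T[n-1][n-1] of an empty table) and inputs
-- whose F or A lack a full n×n prefix: on such ragged inputs A raises IndexError whenever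
-- the data-dependent backtracking path reads a missing cell — a set with no closed form;
-- the rare ragged inputs whose path happens to avoid every short row (on which A still
-- returns, see cites) are excluded with them, and B returns A's value there anyway.
def Pre_trasa2 (F : List (List Int)) (A : List (List Int)) (n : Int) : Prop :=
  1 ≤ n ∧ n.toNat ≤ F.length ∧ n.toNat ≤ A.length ∧
  (∀ row ∈ F.take n.toNat, n.toNat ≤ row.length) ∧
  (∀ row ∈ A.take n.toNat, n.toNat ≤ row.length)
instance (F : List (List Int)) (A : List (List Int)) (n : Int) : Decidable (Pre_trasa2 F A n) := by unfold Pre_trasa2; infer_instance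

def pvWitness_trasa2 : List (List Int) × List (List Int) × Int :=
  ([[1, 2], [3, 4]], [[1, 1], [2, 1]], 2)

def Spec_trasa2 (F : List (List Int)) (A : List (List Int)) (n : Int) (out : List (List String)) : Prop := out = trasa2_alt F A n
instance (F : List (List Int)) (A : List (List Int)) (n : Int) (out : List (List String)) : Decidable (Spec_trasa2 F A n out) := by unfold Spec_trasa2; infer_instance

-- ===== CLAIM (what is proved, stated in full; the proofs are below) =====
def Claim_equal_trasa2 : Prop := ∀ (F : List (List Int)) (A : List (List Int)) (n : Int), Dom_trasa2 F A n → Pre_trasa2 F A n → Spec_trasa2 F A n (trasa2 F A n)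

-- ===== LEMMAS AND PROOFS =====

-- the common backtracking path: the cells A marks after the two initial "X"s, in order
def pvWalk (F A : List (List Int)) (i j : Int) : List (Int × Int) :=
  if i ≤ 0 ∧ j ≤ 0 then []
  else if i ≤ 0 then (i, j - 1) :: pvWalk F A i (j - 1)
  else if j ≤ 0 then (i - 1, j) :: pvWalk F A (i - 1) j
  else if pvGet2 F i j - pvGet2 A i j = pvGet2 F (i - 1) j then (i - 1, j) :: pvWalk F A (i - 1) j
  else (i, j - 1) :: pvWalk F A i (j - 1)
termination_by i.toNat + j.toNat
decreasing_by all_goals omega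

lemma pvWalk_bounds (F A : List (List Int)) (i j : Int) (hi0 : 0 ≤ i) (hj0 : 0 ≤ j) :
    ∀ rc ∈ pvWalk F A i j, 0 ≤ rc.1 ∧ rc.1 ≤ i ∧ 0 ≤ rc.2 ∧ rc.2 ≤ j := by
  fun_induction pvWalk F A i j with
  | case1 h => simp
  | case2 i j h1 h2 ih =>
    intro rc hrc
    rcases List.mem_cons.1 hrc with h | h
    · subst h; simp; omega
    · have := ih hi0 (by omega) rc h; omega
  | case3 i j h1 h2 h3 ih =>
    intro rc hrc
    rcases List.mem_cons.1 hrc with h | h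
    · subst h; simp; omega
    · have := ih (by omega) hj0 rc h; omega
  | case4 i j h1 h2 h3 h4 ih =>
    intro rc hrc
    rcases List.mem_cons.1 hrc with h | h
    · subst h; simp; omega
    · have := ih (by omega) hj0 rc h; omega
  | case5 i j h1 h2 h3 h4 ih =>
    intro rc hrc
    rcases List.mem_cons.1 hrc with h | h
    · subst h; simp; omega
    · have := ih hi0 (by omega) rc h; omega

-- (0,0) is always on the walk (it is where the backtracking ends)
lemma pvWalk_mem_zero (F A : List (List Int)) (i j : Int) (hi0 : 0 ≤ i) (hj0 : 0 ≤ j)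
    (h : 0 < i ∨ 0 < j) : ((0 : Int), (0 : Int)) ∈ pvWalk F A i j := by
  fun_induction pvWalk F A i j with
  | case1 h1 => omega
  | case2 i j h1 h2 ih =>
    by_cases hj : j - 1 = 0
    · have : i = 0 := by omega
      exact List.mem_cons.2 (Or.inl (by simp [this, hj]))
    · exact List.mem_cons.2 (Or.inr (ih hi0 (by omega) (by omega)))
  | case3 i j h1 h2 h3 ih =>
    by_cases hii : i - 1 = 0
    · have : j = 0 := by omega
      exact List.mem_cons.2 (Or.inl (by simp [this, hii]))
    · exact List.mem_cons.2 (Or.inr (ih (by omega) hj0 (by omega)))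
  | case4 i j h1 h2 h3 h4 ih =>
    by_cases hii : i - 1 = 0
    · by_cases hjj : j = 0
      · exact List.mem_cons.2 (Or.inl (by simp [hii, hjj]))
      · exact List.mem_cons.2 (Or.inr (ih (by omega) hj0 (by omega)))
    · exact List.mem_cons.2 (Or.inr (ih (by omega) hj0 (by omega)))
  | case5 i j h1 h2 h3 h4 ih =>
    by_cases hjj : j - 1 = 0
    · by_cases hii : i = 0
      · exact List.mem_cons.2 (Or.inl (by simp [hii, hjj]))
      · exact List.mem_cons.2 (Or.inr (ih hi0 (by omega) (by omega)))
    · exact List.mem_cons.2 (Or.inr (ih hi0 (by omega) (by omega)))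

-- ===== A's loops compute the walk-marked grid =====
lemma mainLoop_id (F A : List (List Int)) (f : Nat) (i j : Int) (T : List (List String))
    (h : i = 0 ∨ j = 0) : trasa2MainLoop F A f i j T = (i, j, T) := by
  cases f with
  | zero => rfl
  | succ f => simp only [trasa2MainLoop]; rw [if_neg (by tauto)]

lemma upLoop_id (f : Nat) (i j : Int) (T : List (List String)) (h : i = 0) :
    trasa2UpLoop f i j T = (i, j, T) := by
  cases f with
  | zero => rfl
  | succ f => simp only [trasa2UpLoop]; rw [if_neg (by simp [h])]

lemma leftLoop_id (f : Nat) (i j : Int) (T : List (List String)) (h : j = 0) :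
    trasa2LeftLoop f i j T = (i, j, T) := by
  cases f with
  | zero => rfl
  | succ f => simp only [trasa2LeftLoop]; rw [if_neg (by simp [h])]

lemma upLoop_snd (f : Nat) : ∀ (i j : Int) (T : List (List String)),
    (trasa2UpLoop f i j T).2.1 = j := by
  induction f with
  | zero => intro i j T; rfl
  | succ f ih =>
    intro i j T
    simp only [trasa2UpLoop]
    by_cases h : i ≠ 0
    · rw [if_pos h]; exact ih _ _ _
    · rw [if_neg h]

lemma trasa2_chain (F A : List (List Int)) :
    ∀ (m : Nat) (i j : Int) (fA fU fL : Nat) (T : List (List String)),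
      0 ≤ i → 0 ≤ j → i.toNat + j.toNat = m → m ≤ fA → m ≤ fU → m ≤ fL →
      (let r1 := trasa2MainLoop F A fA i j T
       let r2 := trasa2UpLoop fU r1.1 r1.2.1 r1.2.2
       (trasa2LeftLoop fL r2.1 r2.2.1 r2.2.2).2.2) =
      (pvWalk F A i j).foldl (fun T rc => pvSet2 T rc.1 rc.2 "X") T := by
  intro m
  induction m with
  | zero =>
    intro i j fA fU fL T hi hj hm _ _ _
    have : i = 0 := by omega
    subst this
    have : j = 0 := by omega
    subst this
    rw [pvWalk]
    simp only [mainLoop_id F A fA 0 0 T (Or.inl rfl), upLoop_id fU 0 0 T rfl,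
      leftLoop_id fL 0 0 T rfl]
    simp
  | succ m ih =>
    intro i j fA fU fL T hi hj hm hfA hfU hfL
    obtain ⟨fA', rfl⟩ : ∃ k, fA = k + 1 := ⟨fA - 1, by omega⟩
    obtain ⟨fU', rfl⟩ : ∃ k, fU = k + 1 := ⟨fU - 1, by omega⟩
    obtain ⟨fL', rfl⟩ : ∃ k, fL = k + 1 := ⟨fL - 1, by omega⟩
    rw [pvWalk]
    by_cases hi0 : i = 0
    · subst hi0
      have hj0 : 0 < j := by omega
      simp only [mainLoop_id F A (fA' + 1) 0 j T (Or.inl rfl), upLoop_id (fU' + 1) 0 j T rfl]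
      simp only [trasa2LeftLoop]
      rw [if_pos (by omega : j ≠ 0),
          if_neg (by omega : ¬((0:Int) ≤ 0 ∧ j ≤ 0)), if_pos (le_refl (0:Int)), List.foldl_cons]
      have := ih 0 (j - 1) (fA' + 1) (fU' + 1) fL' (pvSet2 T 0 (j - 1) "X")
        (le_refl _) (by omega) (by omega) (by omega) (by omega) (by omega)
      simp only [mainLoop_id F A (fA' + 1) 0 (j - 1) _ (Or.inl rfl),
        upLoop_id (fU' + 1) 0 (j - 1) _ rfl] at this
      exact this
    · by_cases hj0 : j = 0
      · subst hj0
        have hi1 : 0 < i := by omega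
        simp only [mainLoop_id F A (fA' + 1) i 0 T (Or.inr rfl)]
        conv_lhs => rw [show trasa2UpLoop (fU' + 1) i 0 T = trasa2UpLoop fU' (i - 1) 0 (pvSet2 T (i - 1) 0 "X") by
          simp only [trasa2UpLoop]; rw [if_pos (by omega : i ≠ 0)]]
        rw [leftLoop_id _ _ _ _ (upLoop_snd fU' (i - 1) 0 _)]
        rw [if_neg (by omega : ¬(i ≤ 0 ∧ (0:Int) ≤ 0)), if_neg (by omega : ¬ i ≤ (0:Int)),
            if_pos (le_refl (0:Int)), List.foldl_cons]
        have := ih (i - 1) 0 (fA' + 1) fU' (fL' + 1) (pvSet2 T (i - 1) 0 "X")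
          (by omega) (le_refl _) (by omega) (by omega) (by omega) (by omega)
        simp only [mainLoop_id F A (fA' + 1) (i - 1) 0 _ (Or.inr rfl)] at this
        rw [leftLoop_id _ _ _ _ (upLoop_snd fU' (i - 1) 0 _)] at this
        exact this
      · -- interior step
        conv_lhs => rw [show trasa2MainLoop F A (fA' + 1) i j T =
            (if pvGet2 F i j - pvGet2 A i j = pvGet2 F (i - 1) j then
              trasa2MainLoop F A fA' (i - 1) j (pvSet2 T (i - 1) j "X")
            else trasa2MainLoop F A fA' i (j - 1) (pvSet2 T i (j - 1) "X")) by
          simp only [trasa2MainLoop]; rw [if_pos (by tauto)]]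
        rw [if_neg (by omega : ¬(i ≤ 0 ∧ j ≤ 0)), if_neg (by omega : ¬ i ≤ (0:Int)),
            if_neg (by omega : ¬ j ≤ (0:Int))]
        by_cases ht : pvGet2 F i j - pvGet2 A i j = pvGet2 F (i - 1) j
        · rw [if_pos ht, if_pos ht, List.foldl_cons]
          exact ih (i - 1) j fA' (fU' + 1) (fL' + 1) (pvSet2 T (i - 1) j "X")
            (by omega) hj (by omega) (by omega) (by omega) (by omega)
        · rw [if_neg ht, if_neg ht, List.foldl_cons]
          exact ih i (j - 1) fA' (fU' + 1) (fL' + 1) (pvSet2 T i (j - 1) "X")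
            hi (by omega) (by omega) (by omega) (by omega) (by omega)

-- membership grid (proof abstraction, used on both sides)
def trasa2Grid (n : Int) (p : List (Int × Int)) : List (List String) :=
  (PySem.List.pyRange 0 n 1).map (fun r =>
    (PySem.List.pyRange 0 n 1).map (fun c => if (r, c) ∈ p then "X" else " "))

-- marking T[r][c] = "X" on a membership grid adds the cell to the set
lemma pvSet2_grid (n : Int) (p : List (Int × Int)) (r c : Int)
    (hr0 : 0 ≤ r) (hrn : r < n) (hc0 : 0 ≤ c) (_hcn : c < n) :
    pvSet2 (trasa2Grid n p) r c "X" = trasa2Grid n ((r, c) :: p) := by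
  have hr' : ((r.toNat : Int)) = r := Int.toNat_of_nonneg hr0
  have hc' : ((c.toNat : Int)) = c := Int.toNat_of_nonneg hc0
  unfold pvSet2 trasa2Grid
  rw [PySem.List.pyGetD_map_pyRange_of_nonneg _ _ _ _ hr0 hrn,
      PySem.List.pySetD_of_nonneg _ _ hc0, PySem.List.pySetD_of_nonneg _ _ hr0]
  apply List.ext_getElem
  · simp
  intro k hk hk'
  simp only [List.getElem_set, List.getElem_map, PySem.List.getElem_pyRange_one, zero_add]
  by_cases hkr : r.toNat = k
  · rw [if_pos hkr]
    subst hkr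
    rw [hr']
    apply List.ext_getElem
    · simp
    intro l hl hl'
    simp only [List.getElem_set, List.getElem_map, PySem.List.getElem_pyRange_one, zero_add]
    by_cases hlc : c.toNat = l
    · rw [if_pos hlc]
      subst hlc
      rw [hc', if_pos List.mem_cons_self]
    · rw [if_neg hlc]
      have hne : ((r, (l : Int)) : Int × Int) ≠ (r, c) := by
        intro h
        exact hlc (by have := congrArg Prod.snd h; simp at this; omega)
      rw [if_congr (show ((r,(l:Int)) ∈ (r,c)::p) ↔ ((r,(l:Int)) ∈ p) by
        simp [List.mem_cons, hne]) rfl rfl]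
  · rw [if_neg hkr]
    apply List.map_congr_left
    intro x _
    have hne : (((k : Int), x) : Int × Int) ≠ (r, c) := by
      intro h
      exact hkr (by have := congrArg Prod.fst h; simp at this; omega)
    rw [if_congr (show (((k:Int),x) ∈ (r,c)::p) ↔ (((k:Int),x) ∈ p) by
      simp [List.mem_cons, hne]) rfl rfl]

-- the grid depends on the path only through membership
lemma trasa2Grid_ext (n : Int) (p q : List (Int × Int)) (h : ∀ x, x ∈ p ↔ x ∈ q) :
    trasa2Grid n p = trasa2Grid n q := by
  unfold trasa2Grid
  apply List.map_congr_left
  intro r _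
  apply List.map_congr_left
  intro c _
  rw [if_congr (h (r, c)) rfl rfl]

-- folding the in-range marks over a membership grid = prepending the cells to the set
lemma marks_grid (n : Int) :
    ∀ (l : List (Int × Int)) (p : List (Int × Int)),
      (∀ rc ∈ l, 0 ≤ rc.1 ∧ rc.1 < n ∧ 0 ≤ rc.2 ∧ rc.2 < n) →
      l.foldl (fun T rc => pvSet2 T rc.1 rc.2 "X") (trasa2Grid n p) =
      trasa2Grid n (l.reverse ++ p) := by
  intro l
  induction l with
  | nil => intro p _; rfl
  | cons x l ih =>
    intro p hb
    obtain ⟨h1, h2, h3, h4⟩ := hb x List.mem_cons_self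
    simp only [List.foldl_cons]
    rw [pvSet2_grid n p x.1 x.2 h1 h2 h3 h4,
        ih ((x.1, x.2) :: p) (fun rc h => hb rc (List.mem_cons_of_mem _ h))]
    apply trasa2Grid_ext
    intro y
    simp [List.mem_append, List.mem_cons]
    try tauto

lemma grid_empty (n : Int) :
    (PySem.List.pyRange 0 n 1).map (fun _ => (PySem.List.pyRange 0 n 1).map (fun _ => " "))
      = trasa2Grid n [] := by
  unfold trasa2Grid
  simp

-- ===== B's structure: the walk decomposed into per-row intervals =====
lemma pvMoveLeft_bounds (F A : List (List Int)) (i j : Int) (hj : 0 ≤ j) :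
    0 ≤ pvMoveLeft F A i j ∧ pvMoveLeft F A i j ≤ j := by
  fun_induction pvMoveLeft F A i j with
  | case1 j h ih => have := ih (by omega); omega
  | case2 j h => omega

-- the cells (i, j-1), (i, j-2), …, (i, lo), in walk order
def leftRun (i j lo : Int) : List (Int × Int) :=
  if lo < j then (i, j - 1) :: leftRun i (j - 1) lo else []
termination_by (j - lo).toNat
decreasing_by omega

lemma mem_leftRun (i j lo : Int) :
    ∀ x, x ∈ leftRun i j lo ↔ x.1 = i ∧ lo ≤ x.2 ∧ x.2 < j := by
  fun_induction leftRun i j lo with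
  | case1 j h ih =>
    intro x
    rw [List.mem_cons, ih x]
    constructor
    · rintro (rfl | h2)
      · simp; omega
      · omega
    · intro hx
      by_cases hxe : x.2 = j - 1
      · left
        obtain ⟨x1, x2⟩ := x
        simp_all
      · right; omega
  | case2 j h =>
    intro x
    simp
    intro _ h2
    omega

-- a row-0 walk is a pure left run
lemma pvWalk_zero (F A : List (List Int)) (j : Int) (hj : 0 ≤ j) :
    pvWalk F A 0 j = leftRun 0 j 0 := by
  induction hk : j.toNat generalizing j with
  | zero =>
    have : j = 0 := by omega
    subst this
    rw [pvWalk, leftRun]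
    simp
  | succ k ih =>
    rw [pvWalk, leftRun]
    rw [if_neg (by omega : ¬((0:Int) ≤ 0 ∧ j ≤ 0)), if_pos (le_refl (0:Int)),
        if_pos (by omega : (0:Int) < j)]
    rw [ih (j - 1) (by omega) (by omega)]

-- a positive-row walk = left run to pvMoveLeft, then step up, then the rest
lemma pvWalk_decomp (F A : List (List Int)) (i j : Int) (hi : 0 < i) (hj : 0 ≤ j) :
    pvWalk F A i j = leftRun i j (pvMoveLeft F A i j) ++
      (i - 1, pvMoveLeft F A i j) :: pvWalk F A (i - 1) (pvMoveLeft F A i j) := by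
  induction hk : j.toNat generalizing j with
  | zero =>
    have hj0 : j = 0 := by omega
    subst hj0
    rw [pvMoveLeft]
    rw [dif_neg (by omega : ¬(0 < (0:Int) ∧ pvGet2 F i 0 - pvGet2 A i 0 ≠ pvGet2 F (i - 1) 0))]
    rw [pvWalk]
    rw [if_neg (by omega : ¬(i ≤ 0 ∧ (0:Int) ≤ 0)), if_neg (by omega : ¬ i ≤ (0:Int)),
        if_pos (le_refl (0:Int))]
    rw [leftRun, if_neg (by omega : ¬((0:Int) < 0))]
    simp
  | succ k ih =>
    have hjpos : 0 < j := by omega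
    by_cases ht : pvGet2 F i j - pvGet2 A i j = pvGet2 F (i - 1) j
    · -- stop: move up here
      rw [pvMoveLeft, dif_neg (by tauto)]
      rw [pvWalk]
      rw [if_neg (by omega : ¬(i ≤ 0 ∧ j ≤ 0)), if_neg (by omega : ¬ i ≤ (0:Int)),
          if_neg (by omega : ¬ j ≤ (0:Int)), if_pos ht]
      rw [leftRun, if_neg (by omega : ¬ j < j)]
      simp
    · -- move left
      have hml : pvMoveLeft F A i j = pvMoveLeft F A i (j - 1) := by
        rw [pvMoveLeft, dif_pos ⟨hjpos, ht⟩]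
      have hle := pvMoveLeft_bounds F A i (j - 1) (by omega)
      rw [pvWalk]
      rw [if_neg (by omega : ¬(i ≤ 0 ∧ j ≤ 0)), if_neg (by omega : ¬ i ≤ (0:Int)),
          if_neg (by omega : ¬ j ≤ (0:Int)), if_neg ht]
      rw [hml, leftRun, if_pos (by omega : pvMoveLeft F A i (j - 1) < j)]
      rw [ih (j - 1) (by omega) (by omega)]
      simp

-- the ideal output rows 0..i, given that the path's right end in row i is hi
def gridRows (F A : List (List Int)) (n : Int) (i hi : Int) : List (List String) :=
  if 0 < i then
    gridRows F A n (i - 1) (pvMoveLeft F A i hi) ++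
      [PySem.List.pyRepeat [" "] (pvMoveLeft F A i hi) ++
       PySem.List.pyRepeat ["X"] (hi - pvMoveLeft F A i hi + 1) ++
       PySem.List.pyRepeat [" "] (n - 1 - hi)]
  else [PySem.List.pyRepeat ["X"] (hi + 1) ++ PySem.List.pyRepeat [" "] (n - 1 - hi)]
termination_by i.toNat
decreasing_by omega

-- a map over a range where the function is constant
lemma map_pyRange_const {α : Type} (f : Int → α) (a b : Int) (v : α)
    (h : ∀ c, a ≤ c → c < b → f c = v) :
    (PySem.List.pyRange a b 1).map f = List.replicate (b - a).toNat v := by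
  rw [List.eq_replicate_iff]
  constructor
  · simp [PySem.List.length_pyRange_one]
  · intro x hx
    obtain ⟨c, hc, rfl⟩ := List.mem_map.1 hx
    rw [PySem.List.mem_pyRange_one] at hc
    exact h c hc.1 hc.2

-- an interval-membership row rendered as three runs
lemma render_interval (n lo hi : Int) (P : Int → Prop) [DecidablePred P]
    (h0 : 0 ≤ lo) (h1 : lo ≤ hi) (h2 : hi < n)
    (hP : ∀ c, 0 ≤ c → c < n → (P c ↔ lo ≤ c ∧ c ≤ hi)) :
    (PySem.List.pyRange 0 n 1).map (fun c => if P c then "X" else " ") =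
      PySem.List.pyRepeat [" "] lo ++ PySem.List.pyRepeat ["X"] (hi - lo + 1) ++
      PySem.List.pyRepeat [" "] (n - 1 - hi) := by
  rw [PySem.List.pyRange_one_append 0 lo n (by omega) (by omega),
      PySem.List.pyRange_one_append lo (hi + 1) n (by omega) (by omega),
      List.map_append, List.map_append]
  rw [map_pyRange_const _ 0 lo " " (fun c hc1 hc2 =>
        if_neg (by rw [hP c hc1 (by omega)]; omega)),
      map_pyRange_const _ lo (hi + 1) "X" (fun c hc1 hc2 =>
        if_pos (by rw [hP c (by omega) (by omega)]; omega)),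
      map_pyRange_const _ (hi + 1) n " " (fun c hc1 hc2 =>
        if_neg (by rw [hP c (by omega) hc2]; omega))]
  rw [PySem.List.pyRepeat_singleton, PySem.List.pyRepeat_singleton, PySem.List.pyRepeat_singleton,
      show (lo - 0 : Int) = lo by ring, show (hi + 1 - lo : Int) = hi - lo + 1 by ring,
      show (n - (hi + 1) : Int) = n - 1 - hi by ring, List.append_assoc]

-- rows 0..i of the membership grid of the path from (i,hi) = the ideal rows
lemma rows_eq (F A : List (List Int)) (n : Int) :
    ∀ (k : Nat) (i hi : Int), i.toNat = k → 0 ≤ i → i < n → 0 ≤ hi → hi < n →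
    (PySem.List.pyRange 0 (i + 1) 1).map (fun r =>
      (PySem.List.pyRange 0 n 1).map (fun c =>
        if (r, c) ∈ ((i, hi) :: pvWalk F A i hi) then "X" else " ")) =
    gridRows F A n i hi := by
  intro k
  induction k with
  | zero =>
    intro i hi hik hi0 hin hhi0 hhin
    have : i = 0 := by omega
    subst this
    rw [pvWalk_zero F A hi hhi0]
    rw [show ((0:Int) + 1) = 0 + 1 from rfl, PySem.List.pyRange_one_singleton, List.map_singleton]
    rw [gridRows, if_neg (by omega : ¬ (0:Int) < 0)]
    rw [render_interval n 0 hi _ (le_refl _) hhi0 hhin (fun c hc1 hc2 => by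
      rw [List.mem_cons, mem_leftRun]
      constructor
      · rintro (h | h)
        · have := congrArg Prod.snd h; simp at this; omega
        · simp at h; omega
      · intro hc
        by_cases hch : c = hi
        · left; rw [hch]
        · right; simp; omega)]
    rw [PySem.List.pyRepeat_singleton, PySem.List.pyRepeat_singleton,
        PySem.List.pyRepeat_singleton]
    simp only [show ((0:Int)).toNat = 0 from rfl, List.replicate_zero, List.nil_append]
    rw [show (hi - 0 + 1 : Int) = hi + 1 by ring, PySem.List.pyRepeat_singleton]
  | succ k ih =>
    intro i hi hik hi0 hin hhi0 hhin
    have hipos : 0 < i := by omega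
    set lo := pvMoveLeft F A i hi with hlo
    have hb := pvMoveLeft_bounds F A i hi hhi0
    rw [pvWalk_decomp F A i hi hipos hhi0]
    rw [PySem.List.pyRange_one_succ_right (by omega : (0:Int) ≤ i), List.map_append,
        List.map_singleton]
    rw [gridRows, if_pos hipos]
    congr 1
    · -- rows 0..i-1
      rw [← ih (i - 1) lo (by omega) (by omega) (by omega) (by omega) (by omega)]
      rw [show (i - 1 + 1 : Int) = i by omega]
      apply List.map_congr_left
      intro r hr
      rw [PySem.List.mem_pyRange_one] at hr
      apply List.map_congr_left
      intro c _
      apply if_congr _ rfl rfl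
      rw [List.mem_cons, List.mem_append, mem_leftRun]
      constructor
      · rintro (h | h | h)
        · exfalso; have := congrArg Prod.fst h; simp at this; omega
        · exfalso; omega
        · exact h
      · intro h; right; right; exact h
    · -- row i
      congr 1
      rw [render_interval n lo hi _ hb.1 hb.2 hhin (fun c hc1 hc2 => by
        rw [List.mem_cons, List.mem_append, mem_leftRun, List.mem_cons]
        constructor
        · rintro (h | h | h | h)
          · have := congrArg Prod.snd h; simp at this; omega
          · simp at h; omega
          · exfalso; have := congrArg Prod.fst h; simp at this; omega
          · exfalso
            have h2 : (i : Int) ≤ i - 1 := (pvWalk_bounds F A (i - 1) lo (by omega) hb.1 _ h).2.1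
            omega
        · intro hc
          by_cases hch : c = hi
          · left; rw [hch]
          · right; left; simp; omega)]

-- B's recursion computes exactly the ideal rows
lemma build_eq (F A : List (List Int)) (n : Int) :
    ∀ (fuel : Nat) (i hi : Int), 0 ≤ i → i.toNat < fuel →
      trasa2AltBuild F A n fuel i hi = gridRows F A n i hi := by
  intro fuel
  induction fuel with
  | zero => intro i hi _ hf; omega
  | succ fuel ih =>
    intro i hi hi0 hf
    by_cases hiz : i = 0
    · subst hiz
      simp only [trasa2AltBuild, if_true]
      rw [gridRows, if_neg (by omega : ¬ (0:Int) < 0)]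
    · simp only [trasa2AltBuild, if_neg hiz]
      rw [ih (i - 1) (pvMoveLeft F A i hi) (by omega) (by omega)]
      conv_rhs => rw [gridRows]
      rw [if_pos (by omega : 0 < i)]

-- ===== VERDICT (by name: the statement is the Claim_ definition above) =====
theorem trasa2_spec : Claim_equal_trasa2 := by
  intro F A n _ hpre
  obtain ⟨hn, -⟩ := hpre
  unfold Spec_trasa2 trasa2 trasa2_alt
  simp only []
  -- A's side: the walk-marked membership grid
  rw [grid_empty n,
      pvSet2_grid n [] (n - 1) (n - 1) (by omega) (by omega) (by omega) (by omega),
      pvSet2_grid n _ 0 0 (le_refl _) (by omega) (le_refl _) (by omega)]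
  rw [trasa2_chain F A ((n - 1).toNat + (n - 1).toNat) (n - 1) (n - 1)
        (2 * n.toNat) (2 * n.toNat) (2 * n.toNat) _
        (by omega) (by omega) rfl (by omega) (by omega) (by omega)]
  rw [marks_grid n (pvWalk F A (n - 1) (n - 1)) _
        (fun rc h => by
          have := pvWalk_bounds F A (n - 1) (n - 1) (by omega) (by omega) rc h
          omega)]
  rw [trasa2Grid_ext n _ ((n - 1, n - 1) :: pvWalk F A (n - 1) (n - 1)) (by
    intro x
    simp only [List.mem_append, List.mem_reverse, List.mem_cons, List.not_mem_nil, or_false]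
    constructor
    · rintro (h | h | h)
      · right; exact h
      · by_cases hn1 : n = 1
        · left; rw [h, hn1]; norm_num
        · right
          rw [h]
          exact pvWalk_mem_zero F A (n - 1) (n - 1) (by omega) (by omega) (by omega)
      · left; exact h
    · rintro (h | h)
      · right; right; exact h
      · left; exact h)]
  -- B's side: the recursion computes the interval rows
  rw [build_eq F A n n.toNat (n - 1) (n - 1) (by omega) (by omega)]
  -- both are gridRows F A n (n-1) (n-1)
  rw [← rows_eq F A n (n - 1).toNat (n - 1) (n - 1) rfl (by omega) (by omega) (by omega)
        (by omega)]
  unfold trasa2Grid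
  rw [show (n - 1 + 1 : Int) = n by omega]
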